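-- pv_equiv track=rewrite | github.com/UdeS-CoBIUS/DoubleRecViz | utils/SpliceFamAlignMulti/src_multi/compare_progressif.py | mblocklength
-- ===== SOURCE A (Python) =====
-- from collections import Counter
--
-- def mblocklength(mblock,allcdsseq):
--     lengths = []
--     for id in mblock.keys():
--         if(id in list(allcdsseq.keys())):
--             lengths.append(mblock[id][1]-mblock[id][0])
--     length,count = Counter(lengths).most_common(1)[0]
--     for id in mblock.keys():
--         if(id in list(allcdsseq.keys()) and (mblock[id][1]-mblock[id][0]) == length):
--             seq = allcdsseq[id][mblock[id][0]:mblock[id][1]]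
--             break
--     return length,seq
-- ===== SOURCE B (Python) =====
-- def mblocklength(mblock, allcdsseq):
--     counts = {}
--     firstseen = {}
--     for id in mblock:
--         if id in allcdsseq:
--             a, b = mblock[id][0], mblock[id][1]
--             n = b - a
--             counts[n] = counts.get(n, 0) + 1
--             if n not in firstseen:
--                 firstseen[n] = allcdsseq[id][a:b]
--     length = max(counts, key=counts.get)
--     return length, firstseen[length]
-- ===== Notes on version B (the rewrite author's own statement) =====
-- stated objective: alternative
-- what changed: Replaces A's two passes over mblock (each rebuilding list(allcdsseq.keys()) and scanning it per id, plus a Counter built from an intermediate lengths list) by a single pass that builds a count table and a first-seen-sequence table, followed by one max and one dict lookup.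
import Mathlib
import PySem

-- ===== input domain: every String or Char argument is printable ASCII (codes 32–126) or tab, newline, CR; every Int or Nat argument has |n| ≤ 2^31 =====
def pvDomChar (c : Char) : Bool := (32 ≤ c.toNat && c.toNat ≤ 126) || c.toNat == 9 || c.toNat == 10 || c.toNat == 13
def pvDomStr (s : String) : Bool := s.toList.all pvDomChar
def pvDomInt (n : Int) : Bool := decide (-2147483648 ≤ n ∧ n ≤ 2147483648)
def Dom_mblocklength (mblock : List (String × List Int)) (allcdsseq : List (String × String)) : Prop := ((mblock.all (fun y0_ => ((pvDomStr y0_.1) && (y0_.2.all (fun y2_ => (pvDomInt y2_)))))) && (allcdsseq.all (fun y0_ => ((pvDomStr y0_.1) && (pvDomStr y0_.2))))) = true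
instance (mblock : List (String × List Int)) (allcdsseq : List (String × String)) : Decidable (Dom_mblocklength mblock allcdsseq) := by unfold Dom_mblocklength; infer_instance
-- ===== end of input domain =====

-- B replaces A's count-then-rescan (which rebuilds list(allcdsseq.keys()) per iteration)
-- by one pass building a count table and a first-seen-sequence table, then one lookup.

-- ===== PORT A =====
-- A: collect lengths of matched blocks, take Counter(...).most_common(1)[0]
-- (= first insertion-ordered item with maximal count, ported as PySem.List.max?,
-- which keeps the FIRST extremal element), then rescan for the first matching id
-- ('break' ported as List.find?) and slice its sequence.
def mblocklength (mblock : List (String × List Int)) (allcdsseq : List (String × String)) : Int × String :=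
  let mb := PySem.Dict.ofList mblock
  let ac := PySem.Dict.ofList allcdsseq
  let lengths := mb.keys.foldl (fun acc id =>
      if ac.keys.contains id then
        acc ++ [PySem.List.pyGetD (mb.getD id []) 1 0 - PySem.List.pyGetD (mb.getD id []) 0 0]
      else acc) []
  let length : Int := match PySem.List.max? (PySem.Dict.counter lengths).items (fun p => p.2) with
    | some p => p.1
    | none => 0
  let seq : String := match mb.keys.find? (fun id =>
      ac.keys.contains id &&
        (PySem.List.pyGetD (mb.getD id []) 1 0 - PySem.List.pyGetD (mb.getD id []) 0 0 == length)) with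
    | some id => PySem.Str.slice (ac.getD id "")
        (some (PySem.List.pyGetD (mb.getD id []) 0 0)) (some (PySem.List.pyGetD (mb.getD id []) 1 0))
    | none => ""
  (length, seq)

-- ===== PORT B =====
-- B: one pass over mblock's keys maintaining (counts, firstseen); then
-- length = max(counts, key=counts.get) (first key with maximal count), seq = firstseen[length].
def mblocklength_alt (mblock : List (String × List Int)) (allcdsseq : List (String × String)) : Int × String :=
  let mb := PySem.Dict.ofList mblock
  let ac := PySem.Dict.ofList allcdsseq
  let st := mb.keys.foldl (fun (st : PySem.Dict Int Int × PySem.Dict Int String) id =>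
      if ac.contains id then
        let a := PySem.List.pyGetD (mb.getD id []) 0 0
        let b := PySem.List.pyGetD (mb.getD id []) 1 0
        let n := b - a
        (st.1.modify n 0 (· + 1),
         if st.2.contains n then st.2 else st.2.insert n (PySem.Str.slice (ac.getD id "") (some a) (some b)))
      else st) (PySem.Dict.empty, PySem.Dict.empty)
  let length : Int := match PySem.List.max? st.1.keys (fun k => st.1.getD k 0) with
    | some k => k
    | none => 0
  (length, st.2.getD length "")

-- ===== PRECONDITION & SPEC =====
-- Pre_ admits exactly the inputs on which the Python A returns: at least one key of
-- mblock is a key of allcdsseq (else Counter(...).most_common(1)[0] raises IndexError),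
-- and every matched key's block list has at least two entries (else mblock[id][1]
-- raises IndexError).
def Pre_mblocklength (mblock : List (String × List Int)) (allcdsseq : List (String × String)) : Prop :=
  (∃ id ∈ (PySem.Dict.ofList mblock).keys, (PySem.Dict.ofList allcdsseq).contains id = true) ∧
  (∀ id ∈ (PySem.Dict.ofList mblock).keys, (PySem.Dict.ofList allcdsseq).contains id = true →
     2 ≤ ((PySem.Dict.ofList mblock).getD id []).length)
instance (mblock : List (String × List Int)) (allcdsseq : List (String × String)) : Decidable (Pre_mblocklength mblock allcdsseq) := by unfold Pre_mblocklength; infer_instance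

def pvWitness_mblocklength : (List (String × List Int)) × (List (String × String)) :=
  ([("a", [0, 2])], [("a", "ABCD")])

def Spec_mblocklength (mblock : List (String × List Int)) (allcdsseq : List (String × String)) (out : Int × String) : Prop := out = mblocklength_alt mblock allcdsseq
instance (mblock : List (String × List Int)) (allcdsseq : List (String × String)) (out : Int × String) : Decidable (Spec_mblocklength mblock allcdsseq out) := by unfold Spec_mblocklength; infer_instance

-- ===== CLAIM (what is proved, stated in full; the proofs are below) =====
def Claim_equal_mblocklength : Prop := ∀ (mblock : List (String × List Int)) (allcdsseq : List (String × String)), Dom_mblocklength mblock allcdsseq → Pre_mblocklength mblock allcdsseq → Spec_mblocklength mblock allcdsseq (mblocklength mblock allcdsseq)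

-- ===== LEMMAS AND PROOFS =====

theorem pv_max?_map {α β κ : Type} [LT κ] [DecidableLT κ]
    (l : List α) (F : α → β) (key : β → κ) :
    PySem.List.max? (l.map F) key = (PySem.List.max? l (fun x => key (F x))).map F := by
  unfold PySem.List.max?
  rw [List.foldl_map]
  suffices h : ∀ acc : Option α, List.foldl
      (fun acc x => match acc with
        | none => some (F x)
        | some m => if key m < key (F x) then some (F x) else some m) (acc.map F) l =
      (List.foldl (fun acc x => match acc with
        | none => some x
        | some m => if key (F m) < key (F x) then some x else some m) acc l).map F from h none
  intro acc
  induction l generalizing acc with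
  | nil => rfl
  | cons x t ih =>
    cases acc with
    | none => simpa using ih (some x)
    | some m =>
      simp only [List.foldl_cons, Option.map_some]
      by_cases h : key (F m) < key (F x)
      · rw [if_pos h, if_pos h]; simpa using ih (some x)
      · rw [if_neg h, if_neg h]; simpa using ih (some m)

theorem pv_find?_filter {α : Type} (l : List α) (p q : α → Bool) :
    (l.filter p).find? q = l.find? (fun x => p x && q x) := by
  rw [List.find?_filter]
  simp

theorem pv_firstseen_getD (f : String → Int) (s : String → String) (L : Int) (dflt : String) :
    ∀ (l : List String) (d : PySem.Dict Int String),
    (l.foldl (fun d id => if d.contains (f id) then d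
                          else d.insert (f id) (s id)) d).getD L dflt =
      (match l.find? (fun id => f id == L) with
       | some id => if d.contains L then d.getD L dflt else s id
       | none => d.getD L dflt) := by
  intro l
  induction l with
  | nil => intro d; rfl
  | cons x t ih =>
    intro d
    simp only [List.foldl_cons, List.find?_cons]
    by_cases hx : f x = L
    · subst hx
      simp only [beq_self_eq_true]
      by_cases hc : d.contains (f x) = true
      · rw [if_pos hc, ih d]
        cases hfind : t.find? (fun id => f id == f x) <;> simp [hc]
      · rw [if_neg hc, ih]
        have hc2 : (d.insert (f x) (s x)).contains (f x) = true :=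
          PySem.Dict.contains_insert_self _ _ _
        cases hfind : t.find? (fun id => f id == f x) <;>
          simp [hc2, hc, PySem.Dict.getD_insert_self]
    · have hbx : (f x == L) = false := by simp [hx]
      rw [hbx]
      by_cases hc : d.contains (f x) = true
      · rw [if_pos hc, ih d]
      · rw [if_neg hc, ih]
        have hne : L ≠ f x := fun h => hx h.symm
        have h1 : (d.insert (f x) (s x)).contains L = d.contains L := by
          rw [PySem.Dict.contains_insert]
          simp [hne]
        have h2 : (d.insert (f x) (s x)).getD L dflt = d.getD L dflt :=
          PySem.Dict.getD_insert_of_ne _ _ _ hne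
        cases hfind : t.find? (fun id => f id == L) <;> simp [h1, h2]

-- ===== VERDICT (by name: the statement is the Claim_ definition above) =====
theorem mblocklength_spec : Claim_equal_mblocklength := by
  unfold Claim_equal_mblocklength
  intro mblock allcdsseq _hdom hpre
  unfold Spec_mblocklength
  obtain ⟨hex, _hlen⟩ := hpre
  unfold mblocklength mblocklength_alt
  dsimp only
  set mb := PySem.Dict.ofList mblock with hmb
  set ac := PySem.Dict.ofList allcdsseq with hac
  set keys := mb.keys with hkeys
  set f : String → Int := fun id =>
    PySem.List.pyGetD (mb.getD id []) 1 0 - PySem.List.pyGetD (mb.getD id []) 0 0 with hf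
  set s : String → String := fun id =>
    PySem.Str.slice (ac.getD id "")
      (some (PySem.List.pyGetD (mb.getD id []) 0 0))
      (some (PySem.List.pyGetD (mb.getD id []) 1 0)) with hs
  set matched := keys.filter (fun id => ac.contains id) with hmatched
  set lengths := matched.map f with hlengths
  -- membership test on the keys list = dict membership
  have hp : ∀ id, ac.keys.contains id = ac.contains id := by
    intro id
    rw [PySem.Dict.contains_eq_decide_mem_keys]
    by_cases h : id ∈ ac.keys <;> simp [h]
  -- A's first loop builds lengths
  have hloopA : keys.foldl (fun acc id =>
      if ac.keys.contains id then acc ++ [f id] else acc) [] = lengths := by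
    rw [PySem.List.foldl_append_if (fun id => ac.keys.contains id) f keys []]
    rw [List.filter_congr (fun x _ => hp x)]
    simp [hlengths, hmatched]
  -- lengths is nonempty
  have hnil : lengths ≠ [] := by
    obtain ⟨id, hid, hcid⟩ := hex
    have : id ∈ matched := by
      rw [hmatched]; exact List.mem_filter.mpr ⟨hid, hcid⟩
    intro h
    rw [hlengths] at h
    exact absurd (List.map_eq_nil_iff.mp h) (List.ne_nil_of_mem this)
  -- the most common length
  obtain ⟨K, hK⟩ : ∃ K, PySem.List.max? (PySem.Dict.counter lengths).keys
      (fun k => (PySem.Dict.counter lengths).getD k 0) = some K := by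
    cases h : PySem.List.max? (PySem.Dict.counter lengths).keys
        (fun k => (PySem.Dict.counter lengths).getD k 0) with
    | some K => exact ⟨K, rfl⟩
    | none =>
      rw [PySem.List.max?_eq_none_iff, PySem.Dict.keys_counter] at h
      obtain ⟨x, hx⟩ := List.exists_mem_of_ne_nil _ hnil
      exact absurd ((PySem.Set.mem_ofList lengths x).mpr hx) (h ▸ List.not_mem_nil)
  have hKmem : K ∈ lengths := by
    have := PySem.List.max?_mem hK
    rw [PySem.Dict.keys_counter] at this
    exact (PySem.Set.mem_ofList lengths K).mp this
  -- first id realising the most common length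
  obtain ⟨id0, hfind⟩ : ∃ id0, matched.find? (fun id => f id == K) = some id0 := by
    cases h : matched.find? (fun id => f id == K) with
    | some id0 => exact ⟨id0, rfl⟩
    | none =>
      obtain ⟨id, hid, hfid⟩ := List.mem_map.mp (hlengths ▸ hKmem)
      have := List.find?_eq_none.mp h id hid
      simp [hfid] at this
  -- A's most_common(1)[0] equals B's max(counts, key=counts.get)
  have hmax : PySem.List.max? (PySem.Dict.counter lengths).items (fun p => p.2)
      = some (K, (PySem.Dict.counter lengths).getD K 0) := by
    rw [PySem.Dict.items_eq_map_keys _ (PySem.Dict.nodup_keys_counter lengths) 0]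
    rw [pv_max?_map _ (fun k => (k, (PySem.Dict.counter lengths).getD k 0)) (fun p => p.2)]
    dsimp only
    rw [hK, Option.map_some]
  -- B's single pass is two independent folds over the matched ids
  have h1 : keys.foldl (fun (st : PySem.Dict Int Int × PySem.Dict Int String) id =>
        if ac.contains id then
          (st.1.modify (f id) 0 (· + 1),
           if st.2.contains (f id) then st.2 else st.2.insert (f id) (s id))
        else st) (PySem.Dict.empty, PySem.Dict.empty)
      = (keys.foldl (fun d id => if ac.contains id then d.modify (f id) 0 (· + 1) else d)
           PySem.Dict.empty,
         keys.foldl (fun d id => if ac.contains id then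
             (if d.contains (f id) then d else d.insert (f id) (s id)) else d)
           PySem.Dict.empty) := by
    rw [PySem.List.foldl_congr_mem keys _
      (fun st id =>
        (if ac.contains id then st.1.modify (f id) 0 (· + 1) else st.1,
         if ac.contains id then
           (if st.2.contains (f id) then st.2 else st.2.insert (f id) (s id))
         else st.2)) _
      (by intro acc x _; by_cases h : ac.contains x <;> simp [h])]
    exact PySem.List.foldl_prod_mk
      (fun (d : PySem.Dict Int Int) id => if ac.contains id then d.modify (f id) 0 (· + 1) else d)
      (fun (d : PySem.Dict Int String) id => if ac.contains id then
          (if d.contains (f id) then d else d.insert (f id) (s id)) else d)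
      keys PySem.Dict.empty PySem.Dict.empty
  -- the counts fold is Counter(lengths)
  have h2 : keys.foldl (fun d id => if ac.contains id then d.modify (f id) 0 (· + 1) else d)
      PySem.Dict.empty = PySem.Dict.counter lengths := by
    rw [PySem.List.foldl_if_eq_foldl_filter, ← hmatched,
      PySem.Dict.counter_eq_foldl, hlengths, List.foldl_map]
  -- the firstseen fold runs over the matched ids
  have h3 : keys.foldl (fun d id => if ac.contains id then
        (if d.contains (f id) then d else d.insert (f id) (s id)) else d)
      PySem.Dict.empty
      = matched.foldl (fun d id => if d.contains (f id) then d
          else d.insert (f id) (s id)) PySem.Dict.empty := by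
    rw [PySem.List.foldl_if_eq_foldl_filter, ← hmatched]
  rw [hloopA, hmax, h1, h2, h3, hK]
  dsimp only
  -- A's rescan-with-break is the firstseen lookup
  rw [← pv_find?_filter keys (fun id => ac.keys.contains id) (fun id => f id == K)]
  rw [List.filter_congr (fun x _ => hp x), ← hmatched, hfind]
  rw [pv_firstseen_getD f s K "" matched PySem.Dict.empty, hfind]
  simp [PySem.Dict.contains_empty]
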